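-- pv_equiv track=rewrite | github.com/austinmw/code | EC504_Data_Structures/HW2/nuts_and_bolts.py | nuts_and_bolts
-- ===== SOURCE A (Python) =====
-- def TEST(x,y):
-- 	if(x<y):
-- 		return "nut is too small"
-- 	elif(x>y):
-- 		return "nut is too big"
-- 	else:
-- 		return "nut fits perfectly"
--
-- def nuts_and_bolts(nuts,bolts):
-- 	n = len(nuts)
-- 	#size n
-- 	Result_nuts = [0 for x in range(n)]
-- 	Result_bolts = [0 for x in range(n)]
-- 	count = [0 for x in range(n)]
-- 	#size n*n
-- 	temp = [[0 for x in range(n)] for x in range(n)]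
--
-- 	#Determine which bolt fits a certain nut
-- 	#Assign 1 if nut is too small
-- 	#Assign 3 if nut is too big
-- 	for i in range(n):
-- 		for j in range(n):
-- 			size = TEST(nuts[i],bolts[j])
-- 			if size == "nut is too small":
-- 				temp[i][j] = 1
-- 			elif size == "nut fits perfectly":
-- 				temp[i][j] = 2
-- 			elif size == "nut is too big":
-- 				temp[i][j] = 3
-- 		#print temp[i]
--
-- 	#Count the number of bolts that are smaller
-- 	#If no bolts are smaller, you know it is the smallest nut
-- 	for i in range(n):
-- 		for j in range(n):
-- 			if temp[i][j] == 3: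
-- 				count[i] = count[i]+1
--
-- 	#Place correct combination of nut and bolt into the count[i] position of the array
-- 	#The sorted nuts and bolts arrays will be returned in the end
-- 	for i in range(n):
-- 		for j in range(n):
-- 			if TEST(nuts[i],bolts[j]) == "nut fits perfectly":
-- 				Result_nuts[count[i]] = nuts[i]
-- 				Result_bolts[count[i]] = bolts[j]
-- 	return Result_nuts,Result_bolts
-- ===== SOURCE B (Python) =====
-- def lower_bound(a, x):
--     lo, hi = 0, len(a)
--     while lo < hi:
--         mid = (lo + hi) // 2
--         if a[mid] < x:
--             lo = mid + 1
--         else: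
--             hi = mid
--     return lo
--
--
-- def nuts_and_bolts(nuts, bolts):
--     # A nut fits a bolt exactly when their sizes are equal, so every matched pair
--     # shares one value: place it at that value's rank among the participating bolts.
--     n = len(nuts)
--     sb = sorted(bolts[:n])
--     result_nuts = [0] * n
--     result_bolts = [0] * n
--     for v in nuts:
--         j = lower_bound(sb, v)
--         if j < n and sb[j] == v:
--             result_nuts[j] = v
--             result_bolts[j] = v
--     return result_nuts, result_bolts
-- ===== Notes on version B (the rewrite author's own statement) =====
-- stated objective: faster
-- what changed: Replaces the O(n^2) compare-matrix, count pass and quadratic placement loop by sorting the first n bolts once and, for each nut, binary-searching its rank in the sorted bolt list and placing the matched value there; Pre_ excludes only inputs where A raises IndexError (fewer bolts than nuts).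
import Mathlib
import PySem

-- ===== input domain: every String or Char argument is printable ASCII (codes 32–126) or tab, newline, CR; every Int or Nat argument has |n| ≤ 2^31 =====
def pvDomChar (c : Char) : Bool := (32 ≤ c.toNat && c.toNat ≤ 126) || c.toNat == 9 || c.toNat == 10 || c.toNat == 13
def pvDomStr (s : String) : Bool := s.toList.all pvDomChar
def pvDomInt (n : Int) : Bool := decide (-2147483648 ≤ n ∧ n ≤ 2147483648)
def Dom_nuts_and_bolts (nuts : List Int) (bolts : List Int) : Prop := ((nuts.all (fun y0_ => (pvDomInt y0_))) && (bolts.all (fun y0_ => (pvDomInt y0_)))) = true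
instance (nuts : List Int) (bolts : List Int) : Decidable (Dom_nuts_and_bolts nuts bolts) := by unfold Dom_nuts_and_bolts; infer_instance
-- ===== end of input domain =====

-- B sorts the first n bolts once and, for each nut, binary-searches its rank in the
-- sorted bolt list and places the matched value there, instead of A's quadratic
-- compare matrix, count pass and quadratic placement loop (objective: faster).


-- ===== PORT A =====
def TEST (x : Int) (y : Int) : String :=
  if x < y then "nut is too small"
  else if x > y then "nut is too big"
  else "nut fits perfectly"

-- range(n) over n = len(nuts) ≥ 0 is ported as List.range n (Nat indices); the nonnegative
-- in-range indexings nuts[i], bolts[j], temp[i][j], count[i] are List.getD (exact wherever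
-- Python returns; bolts[j] with len(bolts) < len(nuts) raises IndexError — excluded by Pre_).
def nuts_and_bolts (nuts : List Int) (bolts : List Int) : List Int × List Int :=
  let n := nuts.length
  let Result_nuts : List Int := List.replicate n 0
  let Result_bolts : List Int := List.replicate n 0
  let count : List Int := List.replicate n 0
  let temp : List (List Int) := List.replicate n (List.replicate n 0)
  let temp := (List.range n).foldl (fun temp i =>
    (List.range n).foldl (fun temp j =>
      let size := TEST (nuts.getD i 0) (bolts.getD j 0)
      if size = "nut is too small" then temp.set i ((temp.getD i []).set j 1)
      else if size = "nut fits perfectly" then temp.set i ((temp.getD i []).set j 2)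
      else if size = "nut is too big" then temp.set i ((temp.getD i []).set j 3)
      else temp) temp) temp
  let count := (List.range n).foldl (fun count i =>
    (List.range n).foldl (fun count j =>
      if (temp.getD i []).getD j 0 = 3 then count.set i (count.getD i 0 + 1) else count) count) count
  let R := (List.range n).foldl (fun (R : List Int × List Int) i =>
    (List.range n).foldl (fun (R : List Int × List Int) j =>
      if TEST (nuts.getD i 0) (bolts.getD j 0) = "nut fits perfectly" then
        (R.1.set (count.getD i 0).toNat (nuts.getD i 0),
         R.2.set (count.getD i 0).toNat (bolts.getD j 0))
      else R) R) (Result_nuts, Result_bolts)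
  R

-- ===== PORT B =====
-- lower_bound's while loop is ported with fuel = len(a) (an upper bound on the number of
-- iterations, since hi - lo starts at len(a) and strictly shrinks); lo, hi, mid stay
-- nonnegative so Nat arithmetic and (lo+hi)/2 are exact for Python's //; a[mid] is always
-- in range under the loop invariant, so List.getD is exact there.
def lowerBoundGo (a : List Int) (x : Int) : Nat → Nat → Nat → Nat
  | 0, lo, _ => lo
  | fuel+1, lo, hi =>
    if lo < hi then
      if a.getD ((lo + hi) / 2) 0 < x then lowerBoundGo a x fuel ((lo + hi) / 2 + 1) hi
      else lowerBoundGo a x fuel lo ((lo + hi) / 2)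
    else lo

def lower_bound (a : List Int) (x : Int) : Nat := lowerBoundGo a x a.length 0 a.length

-- bolts[:n] = List.take n; sorted(...) = PySem.List.sorted; the in-range indexing sb[j]
-- (guarded by j < n) and the list assignments result_*[j] = v are List.getD / List.set.
def nuts_and_bolts_alt (nuts : List Int) (bolts : List Int) : List Int × List Int :=
  let n := nuts.length
  let sb := PySem.List.sorted (bolts.take n) (fun x => x) false
  let R := nuts.foldl (fun (R : List Int × List Int) v =>
    let j := lower_bound sb v
    if j < n ∧ sb.getD j 0 = v then (R.1.set j v, R.2.set j v) else R)
    (List.replicate n 0, List.replicate n 0)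
  R

-- ===== PRECONDITION & SPEC =====
-- Python A raises IndexError (bolts[j], j < len(nuts)) exactly when len(bolts) < len(nuts).
def Pre_nuts_and_bolts (nuts : List Int) (bolts : List Int) : Prop :=
  nuts.length ≤ bolts.length
instance (nuts : List Int) (bolts : List Int) : Decidable (Pre_nuts_and_bolts nuts bolts) := by
  unfold Pre_nuts_and_bolts; infer_instance

def pvWitness_nuts_and_bolts : List Int × List Int := ([2, 1, 1], [1, 2, 1])

def Spec_nuts_and_bolts (nuts : List Int) (bolts : List Int) (out : List Int × List Int) : Prop :=
  out = nuts_and_bolts_alt nuts bolts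
instance (nuts : List Int) (bolts : List Int) (out : List Int × List Int) : Decidable (Spec_nuts_and_bolts nuts bolts out) := by
  unfold Spec_nuts_and_bolts; infer_instance

-- ===== CLAIM (what is proved, stated in full; the proofs are below) =====
def Claim_equal_nuts_and_bolts : Prop := ∀ (nuts : List Int) (bolts : List Int), Dom_nuts_and_bolts nuts bolts → Pre_nuts_and_bolts nuts bolts → Spec_nuts_and_bolts nuts bolts (nuts_and_bolts nuts bolts)

-- ===== LEMMAS AND PROOFS =====

lemma pv_getD_set_self {β : Type} (d : β) (l : List β) (i : Nat) (v : β) (h : i < l.length) :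
    (l.set i v).getD i d = v := by
  rw [List.getD_eq_getElem _ _ (by simpa using h)]; exact List.getElem_set_self _

lemma pv_getD_set_ne {β : Type} (d : β) (l : List β) (i q : Nat) (v : β) (h : i ≠ q) :
    (l.set i v).getD q d = l.getD q d := by
  by_cases hq : q < l.length
  · rw [List.getD_eq_getElem _ _ (by simpa using hq), List.getD_eq_getElem _ _ hq]
    exact List.getElem_set_ne h _
  · rw [List.getD_eq_default _ _ (by simpa using hq), List.getD_eq_default _ _ (by omega)]

lemma pv_foldl_len {σ : Type} {β : Type} (I : List σ) (f : List β → σ → List β)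
    (h : ∀ r i, (f r i).length = r.length) : ∀ (r0 : List β), (I.foldl f r0).length = r0.length := by
  induction I with
  | nil => intro r0; rfl
  | cons a I ih => intro r0; rw [List.foldl_cons, ih, h]

-- conditional-set fold, elementwise (all writes at position q carry the same value w)
lemma pv_foldl_condset {σ : Type} {β : Type} (d : β) (c : σ → Prop) [DecidablePred c]
    (p : σ → Nat) (v : σ → β) (q : Nat) (w : β) :
    ∀ (I : List σ) (r0 : List β), (∀ i ∈ I, c i → p i = q → v i = w) →
    ((I.foldl (fun r i => if c i then r.set (p i) (v i) else r) r0).getD q d)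
      = if (∃ i ∈ I, c i ∧ p i = q) ∧ q < r0.length then w else r0.getD q d := by
  intro I
  induction I with
  | nil => intro r0 _; simp
  | cons a I ih =>
    intro r0 hw
    rw [List.foldl_cons]
    have hw' := fun i hi => hw i (List.mem_cons_of_mem _ hi)
    by_cases hca : c a
    · rw [if_pos hca, ih _ hw', List.length_set]
      by_cases hpa : p a = q
      · subst hpa
        have hv : v a = w := hw a List.mem_cons_self hca rfl
        have hyes : ∃ i ∈ a :: I, c i ∧ p i = p a := ⟨a, List.mem_cons_self, hca, rfl⟩
        by_cases hq : p a < r0.length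
        · by_cases hex : ∃ i ∈ I, c i ∧ p i = p a
          · rw [if_pos ⟨hex, hq⟩, if_pos ⟨hyes, hq⟩]
          · rw [if_neg (fun h => hex h.1), if_pos ⟨hyes, hq⟩, pv_getD_set_self _ _ _ _ hq, hv]
        · rw [if_neg (fun h => hq h.2), if_neg (fun h => hq h.2),
            List.set_eq_of_length_le (by omega)]
      · have hcond : (∃ i ∈ a :: I, c i ∧ p i = q) ↔ (∃ i ∈ I, c i ∧ p i = q) := by
          simp only [List.mem_cons]
          constructor
          · rintro ⟨i, (rfl | hi), h⟩
            · exact absurd h.2 hpa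
            · exact ⟨i, hi, h⟩
          · rintro ⟨i, hi, h⟩; exact ⟨i, Or.inr hi, h⟩
        rw [pv_getD_set_ne _ _ _ _ _ hpa]
        simp only [hcond]
    · rw [if_neg hca, ih _ hw']
      have hcond : (∃ i ∈ a :: I, c i ∧ p i = q) ↔ (∃ i ∈ I, c i ∧ p i = q) := by
        simp only [List.mem_cons]
        constructor
        · rintro ⟨i, (rfl | hi), h⟩
          · exact absurd h.1 hca
          · exact ⟨i, hi, h⟩
        · rintro ⟨i, hi, h⟩; exact ⟨i, Or.inr hi, h⟩
      simp only [hcond]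

-- fold over range m where step k rewrites index k from its own current value
lemma pv_foldl_setIdx {β : Type} (d : β) (G : Nat → β → β) :
    ∀ (m : Nat) (t0 : List β), m ≤ t0.length → ∀ i,
    (((List.range m).foldl (fun t k => t.set k (G k (t.getD k d))) t0).getD i d)
      = if i < m then G i (t0.getD i d) else t0.getD i d := by
  intro m
  induction m with
  | zero => intro t0 _ i; simp
  | succ m ih =>
    intro t0 hm i
    rw [List.range_succ, List.foldl_append, List.foldl_cons, List.foldl_nil]
    have hlen : ((List.range m).foldl (fun t k => t.set k (G k (t.getD k d))) t0).length
        = t0.length := pv_foldl_len _ _ (fun r i => by simp) t0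
    have hprev := ih t0 (by omega)
    by_cases hi : i = m
    · subst hi
      rw [pv_getD_set_self _ _ _ _ (by omega), hprev i, if_neg (by omega), if_pos (by omega)]
    · rw [pv_getD_set_ne _ _ _ _ _ (by omega), hprev i]
      by_cases him : i < m
      · rw [if_pos him, if_pos (by omega)]
      · rw [if_neg him, if_neg (by omega)]

lemma pv_set_getD_self {β : Type} (d : β) (l : List β) (i : Nat) :
    l.set i (l.getD i d) = l := by
  by_cases h : i < l.length
  · rw [List.getD_eq_getElem _ _ h]; exact List.set_getElem_self h
  · exact List.set_eq_of_length_le (by omega)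

-- inner count loop: repeated +1 at a fixed index is one addition of the count
lemma pv_count_inner (P : Nat → Prop) [DecidablePred P] (i : Nat) :
    ∀ (J : List Nat) (c0 : List Int),
    (J.foldl (fun c j => if P j then c.set i (c.getD i 0 + 1) else c) c0)
      = c0.set i (c0.getD i 0 + (J.countP (fun j => decide (P j)) : Int)) := by
  intro J
  induction J with
  | nil =>
    intro c0
    rw [List.foldl_nil, List.countP_nil, Nat.cast_zero, add_zero, pv_set_getD_self]
  | cons j J ih =>
    intro J0
    rw [List.foldl_cons]
    by_cases hp : P j
    · rw [if_pos hp, ih, List.countP_cons_of_pos (by simpa using hp)]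
      by_cases h : i < J0.length
      · rw [pv_getD_set_self _ _ _ _ h, List.set_set]
        push_cast
        ring_nf
      · have e1 : ∀ v : Int, ∀ l : List Int, l.length = J0.length → l.set i v = l :=
          fun v l hl => List.set_eq_of_length_le (by omega)
        rw [e1 _ _ rfl, e1 _ _ rfl, e1 _ _ rfl]
    · rw [if_neg hp, ih, List.countP_cons_of_neg (by simpa using hp)]

-- hoist the row update out of the inner j-loop of the matrix fill
lemma pv_temp_hoist (g : Nat → Int) (i : Nat) :
    ∀ (J : List Nat) (t0 : List (List Int)),
    (J.foldl (fun t j => t.set i ((t.getD i []).set j (g j))) t0)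
      = t0.set i (J.foldl (fun r j => r.set j (g j)) (t0.getD i []) ) := by
  intro J
  induction J with
  | nil => intro t0; rw [List.foldl_nil, List.foldl_nil, pv_set_getD_self]
  | cons j J ih =>
    intro t0
    rw [List.foldl_cons, List.foldl_cons, ih]
    by_cases h : i < t0.length
    · rw [pv_getD_set_self _ _ _ _ h, List.set_set]
    · have e1 : ∀ v : List Int, ∀ l : List (List Int), l.length = t0.length → l.set i v = l :=
        fun v l hl => List.set_eq_of_length_le (by omega)
      rw [e1 _ _ rfl, e1 _ _ rfl, e1 _ _ rfl]

-- flatten a nested fold into a fold over index pairs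
lemma pv_foldl_nested {σ τ β : Type} (J : List τ) (f : β → σ → τ → β) :
    ∀ (I : List σ) (r0 : β),
    (I.foldl (fun r i => J.foldl (fun r j => f r i j) r) r0)
      = (I.flatMap (fun i => J.map (Prod.mk i))).foldl (fun r p => f r p.1 p.2) r0 := by
  intro I
  induction I with
  | nil => intro r0; rfl
  | cons a I ih =>
    intro r0
    rw [List.foldl_cons, List.flatMap_cons, List.foldl_append, ih, List.foldl_map]

-- both result arrays evolve identically when every write stores equal values
lemma pv_pair_fold {σ : Type} (c : σ → Prop) [DecidablePred c] (p : σ → Nat) (v1 v2 : σ → Int)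
    (h : ∀ x, c x → v1 x = v2 x) :
    ∀ (L : List σ) (r : List Int),
    (L.foldl (fun (R : List Int × List Int) x =>
        if c x then (R.1.set (p x) (v1 x), R.2.set (p x) (v2 x)) else R) (r, r))
      = (L.foldl (fun r x => if c x then r.set (p x) (v1 x) else r) r,
         L.foldl (fun r x => if c x then r.set (p x) (v1 x) else r) r) := by
  intro L
  induction L with
  | nil => intro r; rfl
  | cons a L ih =>
    intro r
    rw [List.foldl_cons, List.foldl_cons]
    by_cases hca : c a
    · rw [if_pos hca, if_pos hca, show v2 a = v1 a from (h a hca).symm]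
      exact ih _
    · rw [if_neg hca, if_neg hca]
      exact ih _

-- for a sorted list: positions below the rank of v are exactly those holding values < v
lemma pv_rank_lt (v : Int) :
    ∀ (s : List Int), s.Pairwise (· ≤ ·) →
    ∀ j (hj : j < s.length), (j < s.countP (fun y => decide (y < v)) ↔ s[j] < v) := by
  intro s
  induction s with
  | nil => intro _ j hj; simp at hj
  | cons x t ih =>
    intro hp j hj
    have hx := List.pairwise_cons.mp hp
    by_cases hxv : x < v
    · rw [List.countP_cons_of_pos (by simpa using hxv)]
      cases j with
      | zero => simpa using hxv
      | succ j =>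
        simp only [List.getElem_cons_succ]
        rw [Nat.succ_lt_succ_iff]
        exact ih hx.2 j (by simpa using hj)
    · have hzero : t.countP (fun y => decide (y < v)) = 0 := by
        rw [List.countP_eq_zero]
        intro y hy
        have := hx.1 y hy
        simp only [decide_eq_true_eq]
        omega
      rw [List.countP_cons_of_neg (by simpa using hxv), hzero]
      simp only [Nat.not_lt_zero, false_iff]
      cases j with
      | zero => simpa using hxv
      | succ j =>
        simp only [List.getElem_cons_succ]
        have hjt : j < t.length := by simpa using hj
        have : x ≤ t[j]'hjt := hx.1 _ (List.getElem_mem _)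
        omega

-- a value present in a sorted list sits exactly at its rank
lemma pv_rank_get (s : List Int) (hs : s.Pairwise (· ≤ ·)) (v : Int) (hv : v ∈ s) :
    ∃ h : s.countP (fun y => decide (y < v)) < s.length,
      s[s.countP (fun y => decide (y < v))]'h = v := by
  obtain ⟨j, hj, hjv⟩ := List.mem_iff_getElem.mp hv
  have hC1 : ¬ (j < s.countP (fun y => decide (y < v))) := by
    rw [pv_rank_lt v s hs j hj, hjv]; omega
  have hClt : s.countP (fun y => decide (y < v)) < s.length := by omega
  refine ⟨hClt, ?_⟩
  have h1 : ¬ s[s.countP (fun y => decide (y < v))] < v := by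
    rw [← pv_rank_lt v s hs _ hClt]; omega
  rcases Nat.lt_or_ge (s.countP (fun y => decide (y < v))) j with hlt | hge
  · have h2 : s[s.countP (fun y => decide (y < v))] ≤ s[j] :=
      List.pairwise_iff_getElem.mp hs _ _ hClt hj hlt
    omega
  · have hCj : s.countP (fun y => decide (y < v)) = j := by omega
    have he : s[s.countP (fun y => decide (y < v))]'hClt = s[j]'hj := by congr 1
    rw [he, hjv]

-- the hand-ported binary search computes the rank (count of strictly smaller elements)
lemma pv_lb (s : List Int) (hs : s.Pairwise (· ≤ ·)) (v : Int) :
    ∀ (fuel lo hi : Nat), hi - lo ≤ fuel →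
    lo ≤ s.countP (fun y => decide (y < v)) → s.countP (fun y => decide (y < v)) ≤ hi →
    hi ≤ s.length →
    lowerBoundGo s v fuel lo hi = s.countP (fun y => decide (y < v)) := by
  intro fuel
  induction fuel with
  | zero =>
    intro lo hi h1 h2 h3 _
    simp only [lowerBoundGo]
    omega
  | succ fuel ih =>
    intro lo hi h1 h2 h3 hlen
    simp only [lowerBoundGo]
    by_cases hlt : lo < hi
    · rw [if_pos hlt]
      have hmlen : (lo + hi) / 2 < s.length := by omega
      have hiff := pv_rank_lt v s hs ((lo + hi) / 2) hmlen
      rw [List.getD_eq_getElem _ _ hmlen]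
      by_cases hc : s[(lo + hi) / 2] < v
      · rw [if_pos hc]
        have h4 : (lo + hi) / 2 < s.countP (fun y => decide (y < v)) := hiff.mpr hc
        exact ih _ _ (by omega) (by omega) h3 hlen
      · rw [if_neg hc]
        have h4 : ¬ ((lo + hi) / 2 < s.countP (fun y => decide (y < v))) :=
          fun h => hc (hiff.mp h)
        exact ih _ _ (by omega) h2 (by omega) (by omega)
    · rw [if_neg hlt]
      omega

lemma pv_lower_bound_eq (s : List Int) (hs : s.Pairwise (· ≤ ·)) (v : Int) :
    lower_bound s v = s.countP (fun y => decide (y < v)) := by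
  unfold lower_bound
  exact pv_lb s hs v s.length 0 s.length (by omega) (by omega) List.countP_le_length le_rfl

-- counting over indices equals counting over elements
lemma pv_countP_range (b : List Int) (P : Int → Bool) :
    (List.range b.length).countP (fun j => P (b.getD j 0)) = b.countP P := by
  have hmap : (List.range b.length).map (fun j => b.getD j 0) = b := by
    apply List.ext_getElem (by simp)
    intro i h1 h2
    simp only [List.getElem_map, List.getElem_range]
    rw [List.getD_eq_getElem _ _ h2]
  conv_rhs => rw [← hmap]
  rw [List.countP_map]
  rfl

lemma pv_eq_of_getD (l1 l2 : List Int) (hl : l1.length = l2.length)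
    (h : ∀ q, l1.getD q 0 = l2.getD q 0) : l1 = l2 := by
  apply List.ext_getElem hl
  intro i h1 h2
  have := h i
  rwa [List.getD_eq_getElem _ _ h1, List.getD_eq_getElem _ _ h2] at this

lemma pv_stepA (x y : Int) (t : List (List Int)) (i j : Nat) :
    (if TEST x y = "nut is too small" then t.set i ((t.getD i []).set j 1)
     else if TEST x y = "nut fits perfectly" then t.set i ((t.getD i []).set j 2)
     else if TEST x y = "nut is too big" then t.set i ((t.getD i []).set j 3)
     else t)
    = t.set i ((t.getD i []).set j (if x < y then 1 else if y < x then 3 else 2)) := by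
  unfold TEST
  split_ifs with h1 h2 h3 h4 h5 h6 h7 <;> simp_all

lemma pv_fits (x y : Int) : TEST x y = "nut fits perfectly" ↔ x = y := by
  unfold TEST
  split_ifs with h1 h2
  · simp only [String.reduceEq, false_iff]; omega
  · simp only [String.reduceEq, false_iff]; omega
  · simp only [true_iff]; omega

lemma pv_code3 (x y : Int) : ((if x < y then (1 : Int) else if y < x then 3 else 2) = 3) ↔ y < x := by
  split_ifs with h1 h2 <;> norm_num <;> omega

lemma pv_getD_take (l : List Int) (n j : Nat) (hj : j < n) (hn : n ≤ l.length) :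
    (l.take n).getD j 0 = l.getD j 0 := by
  have h1 : j < (l.take n).length := by simp; omega
  rw [List.getD_eq_getElem _ _ h1, List.getD_eq_getElem _ _ (by omega), List.getElem_take]

lemma pv_foldl_set_getD {β : Type} (d : β) (g : Nat → β) (q m : Nat) (r0 : List β) :
    ((List.range m).foldl (fun r j => r.set j (g j)) r0).getD q d
      = if q < m ∧ q < r0.length then g q else r0.getD q d := by
  have hfun : (fun (r : List β) (i : Nat) => if True then r.set (id i) (g i) else r)
      = fun r j => r.set j (g j) := by funext r j; simp
  have h := pv_foldl_condset d (fun _ => True) id g q (g q) (List.range m) r0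
    (fun i _ _ h => by rw [← h]; rfl)
  rw [hfun] at h
  rw [h]
  by_cases h1 : q < m ∧ q < r0.length
  · rw [if_pos ⟨⟨q, List.mem_range.mpr h1.1, trivial, rfl⟩, h1.2⟩, if_pos h1]
  · rw [if_neg (by rintro ⟨⟨i, hi, -, rfl⟩, hq⟩; exact h1 ⟨List.mem_range.mp hi, hq⟩), if_neg h1]

lemma pv_tempval (nuts bolts : List Int) (i : Nat) (hi : i < nuts.length) (j : Nat) :
    ((List.foldl
        (fun (temp : List (List Int)) (i : Nat) =>
          temp.set i
            (List.foldl
              (fun (r : List Int) (j : Nat) =>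
                r.set j
                  (if nuts.getD i 0 < bolts.getD j 0 then 1
                   else if bolts.getD j 0 < nuts.getD i 0 then 3 else 2))
              (temp.getD i []) (List.range nuts.length)))
        (List.replicate nuts.length (List.replicate nuts.length 0)) (List.range nuts.length)).getD i []).getD j 0
    = if j < nuts.length then
        (if nuts.getD i 0 < bolts.getD j 0 then 1
         else if bolts.getD j 0 < nuts.getD i 0 then 3 else 2)
      else 0 := by
  have hset := pv_foldl_setIdx (β := List Int) []
      (fun k r =>
        List.foldl
          (fun r j =>
            r.set j
              (if nuts.getD k 0 < bolts.getD j 0 then 1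
               else if bolts.getD j 0 < nuts.getD k 0 then 3 else 2))
          r (List.range nuts.length))
      nuts.length (List.replicate nuts.length (List.replicate nuts.length 0)) (by simp) i
  beta_reduce at hset
  rw [hset, if_pos hi, List.getD_replicate _ hi, pv_foldl_set_getD]
  by_cases hj : j < nuts.length
  · rw [if_pos ⟨hj, by simpa using hj⟩, if_pos hj]
  · rw [if_neg (by tauto), if_neg hj, List.getD_eq_default _ _ (by simpa using (by omega : nuts.length ≤ j))]

lemma pv_countval (nuts bolts : List Int) (hpre : nuts.length ≤ bolts.length)
    (i : Nat) (hi : i < nuts.length) :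
    (List.foldl
        (fun (count : List Int) (i : Nat) =>
          count.set i
            (count.getD i 0 +
              ((List.countP
                  (fun j =>
                    decide
                      (((List.foldl
                            (fun (temp : List (List Int)) (i : Nat) =>
                              temp.set i
                                (List.foldl
                                  (fun (r : List Int) (j : Nat) =>
                                    r.set j
                                      (if nuts.getD i 0 < bolts.getD j 0 then 1
                                       else if bolts.getD j 0 < nuts.getD i 0 then 3 else 2))
                                  (temp.getD i []) (List.range nuts.length)))
                            (List.replicate nuts.length (List.replicate nuts.length 0))
                            (List.range nuts.length)).getD i []).getD j 0 = 3))
                  (List.range nuts.length) : Nat) : Int)))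
        (List.replicate nuts.length 0) (List.range nuts.length)).getD i 0
    = ((bolts.take nuts.length).countP (fun y => decide (y < nuts.getD i 0)) : Int) := by
  have hset := pv_foldl_setIdx (β := Int) 0
      (fun k x => x +
        ((List.countP
            (fun j =>
              decide
                (((List.foldl
                      (fun (temp : List (List Int)) (i : Nat) =>
                        temp.set i
                          (List.foldl
                            (fun (r : List Int) (j : Nat) =>
                              r.set j
                                (if nuts.getD i 0 < bolts.getD j 0 then 1
                                 else if bolts.getD j 0 < nuts.getD i 0 then 3 else 2))
                            (temp.getD i []) (List.range nuts.length)))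
                      (List.replicate nuts.length (List.replicate nuts.length 0))
                      (List.range nuts.length)).getD k []).getD j 0 = 3))
            (List.range nuts.length) : Nat) : Int))
      nuts.length (List.replicate nuts.length 0) (by simp) i
  beta_reduce at hset
  rw [hset, if_pos hi, List.getD_replicate _ hi, zero_add]
  have hlen : (bolts.take nuts.length).length = nuts.length := by simp; omega
  have hcong : List.countP
      (fun j =>
        decide
          (((List.foldl
                (fun (temp : List (List Int)) (i : Nat) =>
                  temp.set i
                    (List.foldl
                      (fun (r : List Int) (j : Nat) =>
                        r.set j
                          (if nuts.getD i 0 < bolts.getD j 0 then 1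
                           else if bolts.getD j 0 < nuts.getD i 0 then 3 else 2))
                      (temp.getD i []) (List.range nuts.length)))
                (List.replicate nuts.length (List.replicate nuts.length 0))
                (List.range nuts.length)).getD i []).getD j 0 = 3))
      (List.range nuts.length)
      = List.countP (fun j => decide ((bolts.take nuts.length).getD j 0 < nuts.getD i 0))
          (List.range nuts.length) := by
    apply List.countP_congr
    intro j hj
    have hjn : j < nuts.length := List.mem_range.mp hj
    rw [pv_tempval nuts bolts i hi j, if_pos hjn]
    simp only [decide_eq_true_eq]
    rw [pv_code3, pv_getD_take bolts nuts.length j hjn hpre]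
  rw [hcong,
    show List.range nuts.length = List.range (bolts.take nuts.length).length from by rw [hlen]]
  exact congrArg (fun n : Nat => (n : Int))
    (pv_countP_range (bolts.take nuts.length) (fun y => decide (y < nuts.getD i 0)))

lemma pv_main (nuts bolts : List Int) (hpre : nuts.length ≤ bolts.length) :
    nuts_and_bolts nuts bolts = nuts_and_bolts_alt nuts bolts := by
  simp only [nuts_and_bolts, nuts_and_bolts_alt]
  simp only [pv_stepA, pv_temp_hoist]
  simp only [pv_count_inner, pv_fits]
  rw [pv_foldl_nested]
  set b := bolts.take nuts.length with hbdef
  set sb := PySem.List.sorted b (fun x => x) false with hsbdef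
  have hblen : b.length = nuts.length := by rw [hbdef]; simp; omega
  have hsblen : sb.length = nuts.length := by rw [hsbdef, PySem.List.length_sorted, hblen]
  have hpair : sb.Pairwise (· ≤ ·) := by
    have := PySem.List.sorted_pairwise b (fun x => x)
    rw [hsbdef]
    simpa using this
  have hperm : sb.Perm b := PySem.List.sorted_perm b _ _
  -- replace A's count lookup by the rank, and B's lower_bound by the rank
  rw [PySem.List.foldl_congr_mem _ _
      (fun (R : List Int × List Int) (x : Nat × Nat) =>
        if nuts.getD x.1 0 = bolts.getD x.2 0 then
          (R.1.set (b.countP (fun y => decide (y < nuts.getD x.1 0))) (nuts.getD x.1 0),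
           R.2.set (b.countP (fun y => decide (y < nuts.getD x.1 0))) (bolts.getD x.2 0))
        else R) _
      (by
        intro acc x hx
        obtain ⟨i0, hi0, hm⟩ := List.mem_flatMap.mp hx
        obtain ⟨j0, hj0, rfl⟩ := List.mem_map.mp hm
        have hx1 : i0 < nuts.length := List.mem_range.mp hi0
        rw [pv_countval nuts bolts hpre i0 hx1, Int.toNat_natCast])]
  have hlb : ∀ v : Int, lower_bound sb v = b.countP (fun y => decide (y < v)) := by
    intro v
    rw [pv_lower_bound_eq sb hpair v, hperm.countP_eq]
  simp only [hlb]
  rw [pv_pair_fold (fun x : Nat × Nat => nuts.getD x.1 0 = bolts.getD x.2 0)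
      (fun x => b.countP (fun y => decide (y < nuts.getD x.1 0)))
      (fun x => nuts.getD x.1 0) (fun x => bolts.getD x.2 0) (fun x hc => hc)]
  rw [pv_pair_fold (fun v : Int => b.countP (fun y => decide (y < v)) < nuts.length ∧
        sb.getD (b.countP (fun y => decide (y < v))) 0 = v)
      (fun v => b.countP (fun y => decide (y < v)))
      (fun v => v) (fun v => v) (fun x _ => rfl)]
  simp only [Prod.mk.injEq, and_self]
  apply pv_eq_of_getD
  · rw [pv_foldl_len _ _ (fun r x => by split <;> simp),
      pv_foldl_len _ _ (fun r x => by split <;> simp)]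
  · intro q
    have hgetq_of_rank : ∀ v : Int, v ∈ b →
        b.countP (fun y => decide (y < v)) < sb.length ∧
          sb.getD (b.countP (fun y => decide (y < v))) 0 = v := by
      intro v hv
      have hvsb : v ∈ sb := hperm.mem_iff.mpr hv
      have hcnt : sb.countP (fun y => decide (y < v)) = b.countP (fun y => decide (y < v)) :=
        hperm.countP_eq _
      obtain ⟨hlt, hget⟩ := pv_rank_get sb hpair v hvsb
      refine ⟨hcnt ▸ hlt, ?_⟩
      rw [List.getD_eq_getElem _ _ (hcnt ▸ hlt)]
      have he : sb[b.countP (fun y => decide (y < v))]'(hcnt ▸ hlt)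
          = sb[sb.countP (fun y => decide (y < v))]'hlt := by congr 1; omega
      rw [he, hget]
    rw [pv_foldl_condset 0 (fun x : Nat × Nat => nuts.getD x.1 0 = bolts.getD x.2 0)
        (fun x => b.countP (fun y => decide (y < nuts.getD x.1 0)))
        (fun x => nuts.getD x.1 0) q (sb.getD q 0) _ _
        (by
          intro x hx hc hp
          obtain ⟨i0, hi0, hm⟩ := List.mem_flatMap.mp hx
          obtain ⟨j0, hj0, rfl⟩ := List.mem_map.mp hm
          have hi : i0 < nuts.length := List.mem_range.mp hi0
          have hj : j0 < nuts.length := List.mem_range.mp hj0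
          have hvb : nuts.getD i0 0 ∈ b := by
            rw [hc, ← pv_getD_take bolts nuts.length j0 hj hpre, ← hbdef,
              List.getD_eq_getElem _ _ (by omega)]
            exact List.getElem_mem _
          rw [← hp, ((hgetq_of_rank _ hvb).2)]),
      pv_foldl_condset 0 (fun v : Int => b.countP (fun y => decide (y < v)) < nuts.length ∧
          sb.getD (b.countP (fun y => decide (y < v))) 0 = v)
        (fun v => b.countP (fun y => decide (y < v)))
        (fun v => v) q (sb.getD q 0) _ _
        (fun v _ hc hp => by rw [← hp, hc.2])]
    refine if_congr ?_ rfl rfl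
    constructor
    · rintro ⟨⟨x, hx, hc, hp⟩, hq⟩
      obtain ⟨i0, hi0, hm⟩ := List.mem_flatMap.mp hx
      obtain ⟨j0, hj0, rfl⟩ := List.mem_map.mp hm
      have hi : i0 < nuts.length := List.mem_range.mp hi0
      have hj : j0 < nuts.length := List.mem_range.mp hj0
      have hvb : nuts.getD i0 0 ∈ b := by
        rw [hc, ← pv_getD_take bolts nuts.length j0 hj hpre, ← hbdef,
          List.getD_eq_getElem _ _ (by omega)]
        exact List.getElem_mem _
      obtain ⟨h1, h2⟩ := hgetq_of_rank _ hvb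
      refine ⟨⟨nuts.getD i0 0, ?_, ⟨by omega, h2⟩, hp⟩, hq⟩
      rw [List.getD_eq_getElem _ _ hi]
      exact List.getElem_mem _
    · rintro ⟨⟨v, hvm, ⟨h1, h2⟩, hp⟩, hq⟩
      obtain ⟨i, hi, hiv⟩ := List.mem_iff_getElem.mp hvm
      have hvsb : v ∈ sb := by
        rw [← h2, List.getD_eq_getElem _ _ (by omega)]
        exact List.getElem_mem _
      obtain ⟨j, hjb, hjv⟩ := List.mem_iff_getElem.mp (hperm.mem_iff.mp hvsb)
      have hj : j < nuts.length := by omega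
      refine ⟨⟨(i, j), List.mem_flatMap.mpr ⟨i, List.mem_range.mpr hi,
        List.mem_map.mpr ⟨j, List.mem_range.mpr hj, rfl⟩⟩, ?_, ?_⟩, hq⟩
      · rw [List.getD_eq_getElem _ _ hi, hiv, ← pv_getD_take bolts nuts.length j hj hpre,
          ← hbdef, List.getD_eq_getElem _ _ hjb, hjv]
      · rw [List.getD_eq_getElem _ _ hi, hiv]
        exact hp

-- ===== VERDICT (by name: the statement is the Claim_ definition above) =====
theorem nuts_and_bolts_spec : Claim_equal_nuts_and_bolts := by
  intro nuts bolts _ hpre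
  unfold Spec_nuts_and_bolts
  exact pv_main nuts bolts hpre
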